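-- pv_equiv track=rewrite | github.com/Elizaveta-pl/d-19 | Web3/tel1.py | check
-- ===== SOURCE A (Python) =====
-- def check(phone_number):
--     bracket = phone_number.count('(')
--     stack = []
--     for i in phone_number:
--         if i == '(':
--             stack.append(i)
--         elif i == ')':
--             if (len(stack) > 0):
--                 stack.pop()
--             else:
--                 return False
--     if len(stack) == 0 and bracket == 1:
--         return True
--     else:
--         return False
-- ===== SOURCE B (Python) =====
-- def check(phone_number):
--     return (phone_number.count('(') == 1
--             and phone_number.count(')') == 1
--             and phone_number.find('(') < phone_number.find(')'))
-- ===== Notes on version B (the rewrite author's own statement) =====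
-- stated objective: simpler
-- what changed: Replaces the character-by-character stack simulation with a direct predicate via str.count and str.find: exactly one opening and one closing parenthesis, with the opening one occurring first.
import Mathlib
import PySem

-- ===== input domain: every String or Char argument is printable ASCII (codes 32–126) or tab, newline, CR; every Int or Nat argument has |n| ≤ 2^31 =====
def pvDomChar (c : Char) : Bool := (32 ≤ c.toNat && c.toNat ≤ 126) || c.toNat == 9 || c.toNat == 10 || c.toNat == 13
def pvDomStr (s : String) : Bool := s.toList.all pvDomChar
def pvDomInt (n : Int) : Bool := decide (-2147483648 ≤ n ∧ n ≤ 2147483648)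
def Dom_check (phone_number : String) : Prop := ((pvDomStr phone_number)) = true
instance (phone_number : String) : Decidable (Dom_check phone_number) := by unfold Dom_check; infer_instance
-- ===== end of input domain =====

-- B replaces A's stack simulation by a direct predicate (one '(' , one ')', '(' before ')'); objective: simpler.


-- ===== PORT A =====
-- the for-loop over the characters, with the stack; returns False early on an unmatched ')'
def checkLoop (bracket : Nat) : List Char → List Char → Bool
  | [], stack => stack.length == 0 && bracket == 1
  | i :: rest, stack =>
    if i = '(' then checkLoop bracket rest (stack ++ [i])
    else if i = ')' then
      if stack.length > 0 then checkLoop bracket rest stack.dropLast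
      else false
    else checkLoop bracket rest stack

def check (phone_number : String) : Bool :=
  let bracket := PySem.Str.count phone_number "("
  checkLoop bracket phone_number.toList []

-- ===== PORT B =====
def check_alt (phone_number : String) : Bool :=
  PySem.Str.count phone_number "(" == 1 &&
    (PySem.Str.count phone_number ")" == 1 &&
      decide (PySem.Str.find phone_number "(" < PySem.Str.find phone_number ")"))

-- ===== PRECONDITION & SPEC =====
def Spec_check (phone_number : String) (out : Bool) : Prop := out = check_alt phone_number
instance (phone_number : String) (out : Bool) : Decidable (Spec_check phone_number out) := by unfold Spec_check; infer_instance

-- ===== CLAIM (what is proved, stated in full; the proofs are below) =====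
def Claim_equal_check : Prop := ∀ (phone_number : String), Dom_check phone_number → Spec_check phone_number (check phone_number)

-- ===== LEMMAS AND PROOFS =====

-- count of a single-character substring is List.count
theorem count_go_single (c : Char) : ∀ (s : List Char) (n acc : Nat), s.length ≤ n →
    PySem.Chars.count.go [c] n s acc = acc + s.count c := by
  intro s
  induction s with
  | nil => intro n acc _; cases n <;> simp [PySem.Chars.count.go]
  | cons x t ih =>
    intro n acc h
    cases n with
    | zero => simp at h
    | succ m =>
      by_cases hx : c = x
      · subst hx
        rw [show PySem.Chars.count.go [c] (m + 1) (c :: t) acc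
              = PySem.Chars.count.go [c] m t (acc + 1) from by
            simp [PySem.Chars.count.go, List.isPrefixOf]]
        rw [ih m (acc + 1) (by simpa using h)]
        simp [List.count_cons]
        omega
      · rw [show PySem.Chars.count.go [c] (m + 1) (x :: t) acc
              = PySem.Chars.count.go [c] m t acc from by
            simp [PySem.Chars.count.go, List.isPrefixOf, hx]]
        rw [ih m acc (by simpa using h)]
        simp [List.count_cons, Ne.symm hx]

theorem count_single (s : List Char) (c : Char) : PySem.Chars.count s [c] = s.count c := by
  simp [PySem.Chars.count, count_go_single c s s.length 0 le_rfl]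

-- find.go with a single-character needle: shift of the offset
theorem find_go_single (c : Char) : ∀ (s : List Char) (k : Nat),
    PySem.Chars.find.go [c] s k =
      if c ∈ s then (k : Int) + PySem.Chars.find.go [c] s 0 else -1 := by
  intro s
  induction s with
  | nil => intro k; simp [PySem.Chars.find.go]
  | cons x t ih =>
    intro k
    by_cases hx : c = x
    · subst hx
      simp [PySem.Chars.find.go, List.isPrefixOf]
    · have hpre : ([c].isPrefixOf (x :: t)) = false := by
        simp [List.isPrefixOf]; exact hx
      simp only [PySem.Chars.find.go, hpre, Bool.false_eq_true, if_false, List.mem_cons]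
      rw [ih (k + 1), ih 1]
      by_cases hm : c ∈ t
      · simp [hm, hx]; push_cast; ring
      · simp [hm, hx]

theorem find_cons_single (c x : Char) (t : List Char) :
    PySem.Chars.find (x :: t) [c] =
      if c = x then 0
      else if c ∈ t then 1 + PySem.Chars.find t [c] else -1 := by
  by_cases hx : c = x
  · subst hx; simp [PySem.Chars.find, PySem.Chars.find.go, List.isPrefixOf]
  · have hpre : ([c].isPrefixOf (x :: t)) = false := by
      simp [List.isPrefixOf]; exact hx
    simp only [PySem.Chars.find, PySem.Chars.find.go, hpre, Bool.false_eq_true, if_false]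
    rw [find_go_single c t 1]
    simp [hx]

theorem find_nonneg_single (c : Char) (s : List Char) (h : c ∈ s) :
    0 ≤ PySem.Chars.find s [c] := by
  induction s with
  | nil => simp at h
  | cons x t ih =>
    rw [find_cons_single]
    by_cases hx : c = x
    · simp [hx]
    · have ht : c ∈ t := by rcases List.mem_cons.mp h with h1 | h1; exact absurd h1 hx; exact h1
      have := ih ht
      simp [hx, ht]; omega

-- the stack simulation only depends on the stack's length
def bal : List Char → Nat → Bool
  | [], n => n == 0
  | c :: r, n =>
    if c = '(' then bal r (n + 1)
    else if c = ')' then (match n with | 0 => false | m + 1 => bal r m)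
    else bal r n

theorem loop_eq (bracket : Nat) : ∀ (l st : List Char),
    checkLoop bracket l st = (bal l st.length && bracket == 1) := by
  intro l
  induction l with
  | nil => intro st; simp [checkLoop, bal]
  | cons x r ih =>
    intro st
    by_cases h1 : x = '('
    · simp [checkLoop, bal, h1, ih]
    · by_cases h2 : x = ')'
      · cases hst : st.length with
        | zero => simp [checkLoop, bal, h1, h2, hst]
        | succ m =>
          have hlen : st.dropLast.length = m := by
            simp [List.length_dropLast, hst]
          simp [checkLoop, bal, h1, h2, hst, ih, hlen]
      · simp [checkLoop, bal, h1, h2, ih]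

-- with no '(' left, bal succeeds iff exactly n closing brackets remain
theorem bal_noopen : ∀ (r : List Char) (n : Nat), r.count '(' = 0 →
    bal r n = (r.count ')' == n) := by
  intro r
  induction r with
  | nil => intro n _; cases n <;> simp [bal]
  | cons x t ih =>
    intro n h
    have hx : x ≠ '(' := by
      intro hc; subst hc; simp [List.count_cons] at h
    have ht : t.count '(' = 0 := by simp [List.count_cons] at h; omega
    by_cases h2 : x = ')'
    · subst h2
      cases n with
      | zero => simp [bal, hx, List.count_cons]
      | succ m => simp [bal, hx, ih m ht, List.count_cons]
    · simp [bal, hx, h2, ih n ht, List.count_cons, h2]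

-- the heart: stack simulation (plus the one-'(' test) equals B's predicate, on char lists
theorem core_eq : ∀ (l : List Char),
    (bal l 0 && (l.count '(' == 1)) =
      ((l.count '(' == 1) &&
        ((l.count ')' == 1) &&
          decide (PySem.Chars.find l ['('] < PySem.Chars.find l [')']))) := by
  intro l
  induction l with
  | nil => simp [bal]
  | cons x r ih =>
    by_cases h1 : x = '('
    · subst h1
      by_cases ho : r.count '(' = 0
      · have hbal : bal ('(' :: r) 0 = (r.count ')' == 1) := by
          simp [bal, bal_noopen r 1 ho]
        rw [find_cons_single, find_cons_single]
        by_cases hc : r.count ')' = 1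
        · have hm : ')' ∈ r := List.count_pos_iff.mp (by omega)
          have hf := find_nonneg_single ')' r hm
          simp [hbal, List.count_cons, ho, hc, hm]
          omega
        · simp [hbal, List.count_cons, ho, hc]
      · have hfalse : (r.count '(' == 0) = false := by simpa using ho
        simp [List.count_cons, bal, hfalse]
    · by_cases h2 : x = ')'
      · subst h2
        rw [find_cons_single, find_cons_single]
        by_cases hm : '(' ∈ r
        · have hf := find_nonneg_single '(' r hm
          simp [bal, h1, List.count_cons, hm]
          intros; omega
        · have h0 : r.count '(' = 0 := List.count_eq_zero.mpr hm
          simp [bal, h1, List.count_cons, hm, h0]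
      · have hLHS : bal (x :: r) 0 = bal r 0 := by simp [bal, h1, h2]
        rw [find_cons_single, find_cons_single]
        by_cases ho : r.count '(' = 1
        · by_cases hc : r.count ')' = 1
          · have hmo : '(' ∈ r := List.count_pos_iff.mp (by omega)
            have hmc : ')' ∈ r := List.count_pos_iff.mp (by omega)
            have hco : List.count '(' (x :: r) = List.count '(' r := by
              simp [List.count_cons]; exact h1
            have hcc : List.count ')' (x :: r) = List.count ')' r := by
              simp [List.count_cons]; exact h2
            rw [hLHS, hco, hcc, ih]
            have hxo : ('(' = x) = False := by simp; exact fun h => h1 h.symm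
            have hxc : (')' = x) = False := by simp; exact fun h => h2 h.symm
            simp [hmo, hmc, ho, hc, hxo, hxc]
          · have hco : List.count '(' (x :: r) = List.count '(' r := by
              simp [List.count_cons]; exact h1
            have hcc : List.count ')' (x :: r) = List.count ')' r := by
              simp [List.count_cons]; exact h2
            have hfc : (r.count ')' == 1) = false := by simpa using hc
            have hIH := ih
            simp [ho, hfc] at hIH
            rw [hLHS, hco, hcc]
            simp [ho, hfc, hIH]
        · have hco : List.count '(' (x :: r) = List.count '(' r := by
            simp [List.count_cons]; exact h1
          rw [hco]
          have hfalse : (r.count '(' == 1) = false := by simpa using ho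
          simp [hfalse]

-- ===== VERDICT (by name: the statement is the Claim_ definition above) =====
theorem check_spec : Claim_equal_check := by
  intro s _
  unfold Spec_check check check_alt
  have hb : (PySem.Str.count s "(") = s.toList.count '(' := by
    rw [PySem.Str.count_eq]; exact count_single _ _
  have hc : (PySem.Str.count s ")") = s.toList.count ')' := by
    rw [PySem.Str.count_eq]; exact count_single _ _
  rw [hb, hc, loop_eq, PySem.Str.find_eq, PySem.Str.find_eq]
  simpa using core_eq s.toList
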